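-- pv_equiv track=rewrite | github.com/aokassamali/coding-agent-evals | src/coding_eval/oscillation_metrics.py | count_approach_oscillations
-- ===== SOURCE A (Python) =====
-- from typing import Any, Dict, List, Optional, Tuple
--
-- def count_approach_oscillations(approach_seq: List[Optional[str]]) -> int:
--     """Count architectural A-B-A oscillations (not just severity flips)"""
--     # Filter out None/unknown
--     clean_seq = [a for a in approach_seq if a and a != "unknown"]
--     if len(clean_seq) < 3:
--         return 0
--
--     osc = 0
--     for i in range(2, len(clean_seq)):
--         a, b, c = clean_seq[i-2], clean_seq[i-1], clean_seq[i]
--         # A -> B -> A pattern (switched away then came back)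
--         if a != b and b != c and a == c:
--             osc += 1
--     return osc
-- ===== SOURCE B (Python) =====
-- def count_approach_oscillations(approach_seq):
--     """Run-length encode the kept approaches, then count interior singleton
--     runs whose two neighbouring runs carry the same value (each such run is
--     exactly one A-B-A oscillation)."""
--     runs = []
--     for a in approach_seq:
--         if not a or a == "unknown":
--             continue
--         if runs and runs[-1][0] == a:
--             runs[-1] = (a, runs[-1][1] + 1)
--         else:
--             runs.append((a, 1))
--     return sum(1 for p, q, r in zip(runs, runs[1:], runs[2:])
--                if q[1] == 1 and p[0] == r[0])
-- ===== Notes on version B (the rewrite author's own statement) =====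
-- stated objective: alternative
-- what changed: B uses a different algorithm: it run-length encodes the kept approaches into (value, length) runs and counts interior runs of length 1 whose neighbouring runs have equal values, instead of A's triple scan over the filtered sequence; each A-B-A triple corresponds to exactly one interior singleton run flanked by equal values.
import Mathlib
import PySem

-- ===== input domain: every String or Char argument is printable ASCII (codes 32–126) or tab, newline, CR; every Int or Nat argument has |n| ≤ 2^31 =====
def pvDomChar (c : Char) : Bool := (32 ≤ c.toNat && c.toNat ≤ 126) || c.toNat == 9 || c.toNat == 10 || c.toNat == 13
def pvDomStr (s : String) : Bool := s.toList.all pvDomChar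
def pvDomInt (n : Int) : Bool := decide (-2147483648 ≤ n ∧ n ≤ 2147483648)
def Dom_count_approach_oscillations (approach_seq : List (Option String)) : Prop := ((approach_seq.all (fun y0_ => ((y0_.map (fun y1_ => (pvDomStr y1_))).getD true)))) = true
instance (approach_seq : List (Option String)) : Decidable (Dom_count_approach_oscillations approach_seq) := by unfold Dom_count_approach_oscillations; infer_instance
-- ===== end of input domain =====

-- B counts oscillations by a different algorithm: run-length encode the kept values and
-- count interior length-1 runs whose neighbouring runs have equal values (objective: alternative).

-- ===== PORT A =====
-- clean_seq = [a for a in approach_seq if a and a != "unknown"]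
def pvCleanA (approach_seq : List (Option String)) : List String :=
  approach_seq.filterMap (fun a0 =>
    match a0 with
    | none => none
    | some s => if s ≠ "" ∧ s ≠ "unknown" then some s else none)

def count_approach_oscillations (approach_seq : List (Option String)) : Int :=
  let clean_seq := pvCleanA approach_seq
  if clean_seq.length < 3 then 0
  else
    (PySem.List.pyRange 2 (clean_seq.length : Int) 1).foldl
      (fun osc i =>
        let a := PySem.List.pyGetD clean_seq (i - 2) ""
        let b := PySem.List.pyGetD clean_seq (i - 1) ""
        let c := PySem.List.pyGetD clean_seq i ""
        if a ≠ b ∧ b ≠ c ∧ a = c then osc + 1 else osc) 0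

-- ===== PORT B =====
-- one step of run building: merge into the last run (runs[-1] = (a, k+1)) or append (a,1)
def pvSnocRun (acc : List (String × Int)) (a : String) : List (String × Int) :=
  match acc.getLast? with
  | some (v, k) => if v = a then acc.dropLast ++ [(v, k + 1)] else acc ++ [(a, 1)]
  | none => [(a, 1)]

def count_approach_oscillations_alt (approach_seq : List (Option String)) : Int :=
  let runs := approach_seq.foldl
    (fun acc o =>
      match o with
      | none => acc
      | some s => if s = "" ∨ s = "unknown" then acc else pvSnocRun acc s) []
  -- sum(1 for p,q,r in zip(runs, runs[1:], runs[2:]) if q[1]==1 and p[0]==r[0])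
  (runs.zip ((PySem.List.slice runs (some 1) none).zip (PySem.List.slice runs (some 2) none))).foldl
    (fun osc pqr => if pqr.2.1.2 = 1 ∧ pqr.1.1 = pqr.2.2.1 then osc + 1 else osc) 0

-- ===== PRECONDITION & SPEC =====
def Spec_count_approach_oscillations (approach_seq : List (Option String)) (out : Int) : Prop := out = count_approach_oscillations_alt approach_seq
instance (approach_seq : List (Option String)) (out : Int) : Decidable (Spec_count_approach_oscillations approach_seq out) := by unfold Spec_count_approach_oscillations; infer_instance

-- ===== CLAIM (what is proved, stated in full; the proofs are below) =====
def Claim_equal_count_approach_oscillations : Prop := ∀ (approach_seq : List (Option String)), Dom_count_approach_oscillations approach_seq → Spec_count_approach_oscillations approach_seq (count_approach_oscillations approach_seq)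

-- ===== LEMMAS AND PROOFS =====

/-- Reference count of A-B-A triples of adjacent elements. -/
def pvCnt3 : List String → Int
  | a :: b :: c :: t => (if a ≠ b ∧ b ≠ c ∧ a = c then 1 else 0) + pvCnt3 (b :: c :: t)
  | _ => 0

theorem pvCnt3_short (l : List String) (h : l.length < 3) : pvCnt3 l = 0 := by
  rcases l with _ | ⟨a, _ | ⟨b, _ | ⟨c, t⟩⟩⟩
  · simp [pvCnt3]
  · simp [pvCnt3]
  · simp [pvCnt3]
  · simp at h; omega

theorem foldl_if_sum {α : Type} (P : α → Prop) [DecidablePred P] (L : List α) (acc : Int) :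
    L.foldl (fun a x => if P x then a + 1 else a) acc
      = acc + (L.map (fun x => if P x then (1 : Int) else 0)).sum := by
  induction L generalizing acc with
  | nil => simp
  | cons x t ih => by_cases h : P x <;> simp [h, ih] <;> ring

def pvF (l : List String) (k : Nat) : Int :=
  if l.getD k "" ≠ l.getD (k + 1) "" ∧ l.getD (k + 1) "" ≠ l.getD (k + 2) ""
      ∧ l.getD k "" = l.getD (k + 2) "" then 1 else 0

theorem pvSum_cnt3 (l : List String) :
    ((List.range (l.length - 2)).map (pvF l)).sum = pvCnt3 l := by
  induction l using pvCnt3.induct with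
  | case2 l h =>
    rcases l with _ | ⟨a, _ | ⟨b, _ | ⟨c, t⟩⟩⟩
    · simp [pvCnt3]
    · simp [pvCnt3]
    · simp [pvCnt3]
    · exact (h a b c t rfl).elim
  | case1 a b c t ih =>
    have hlen : (a :: b :: c :: t).length - 2 = t.length + 1 := by simp
    rw [hlen, List.range_succ_eq_map, List.map_cons, List.map_map, List.sum_cons]
    have hs : (pvF (a :: b :: c :: t)) ∘ Nat.succ = pvF (b :: c :: t) := by
      funext k; simp [pvF]
    have hlen2 : (b :: c :: t).length - 2 = t.length := by simp
    rw [hs, ← hlen2, ih]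
    have h0 : pvF (a :: b :: c :: t) 0 = (if a ≠ b ∧ b ≠ c ∧ a = c then 1 else 0) := by
      simp [pvF]
    rw [h0]
    conv_rhs => rw [pvCnt3]

theorem pvA_eq_cnt3 (xs : List (Option String)) :
    count_approach_oscillations xs = pvCnt3 (pvCleanA xs) := by
  unfold count_approach_oscillations
  set l := pvCleanA xs with hl
  by_cases h : l.length < 3
  · simp [h, pvCnt3_short l h]
  · simp only [h, if_false]
    rw [PySem.List.pyRange_one]
    rw [List.foldl_map]
    rw [foldl_if_sum (fun k : Nat =>
      PySem.List.pyGetD l (2 + (k : Int) - 2) "" ≠ PySem.List.pyGetD l (2 + (k : Int) - 1) "" ∧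
      PySem.List.pyGetD l (2 + (k : Int) - 1) "" ≠ PySem.List.pyGetD l (2 + (k : Int)) "" ∧
      PySem.List.pyGetD l (2 + (k : Int) - 2) "" = PySem.List.pyGetD l (2 + (k : Int)) "")]
    rw [← pvSum_cnt3 l]
    have hn : ((l.length : Int) - 2).toNat = l.length - 2 := by omega
    rw [hn]
    simp only [Int.zero_add]
    congr 1
    apply List.map_congr_left
    intro k _
    have h2 : (2 : Int) + (k : Int) - 2 = ((k : Nat) : Int) := by omega
    have h1 : (2 : Int) + (k : Int) - 1 = (((k + 1 : Nat)) : Int) := by push_cast; omega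
    have h0 : (2 : Int) + (k : Int) = (((k + 2 : Nat)) : Int) := by push_cast; omega
    rw [h2, h1, h0, PySem.List.pyGetD_natCast, PySem.List.pyGetD_natCast,
      PySem.List.pyGetD_natCast]
    simp [pvF]

-- ---- B side ----

/-- Structural version of pvSnocRun. -/
def pvSnoc2 : List (String × Int) → String → List (String × Int)
  | [], a => [(a, 1)]
  | [(v, k)], a => if v = a then [(v, k + 1)] else [(v, k), (a, 1)]
  | p :: q :: t, a => p :: pvSnoc2 (q :: t) a

theorem pvSnocRun_eq (acc : List (String × Int)) (a : String) :
    pvSnocRun acc a = pvSnoc2 acc a := by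
  induction acc with
  | nil => simp [pvSnocRun, pvSnoc2]
  | cons p t ih =>
    rcases t with _ | ⟨q, t⟩
    · obtain ⟨v, k⟩ := p
      by_cases h : v = a <;> simp [pvSnocRun, pvSnoc2, h]
    · simp only [pvSnoc2, ← ih]
      simp only [pvSnocRun, List.getLast?_cons_cons]
      rcases hg : (q :: t).getLast? with _ | ⟨v, k⟩
      · simp at hg
      · by_cases h : v = a <;> simp [h, List.dropLast_cons_of_ne_nil]

/-- One front step of run grouping. -/
def pvConsRun (a : String) : List (String × Int) → List (String × Int)
  | (v, k) :: r => if a = v then (v, k + 1) :: r else (a, 1) :: (v, k) :: r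
  | [] => [(a, 1)]

/-- Run-length encoding, by front recursion. -/
def pvRuns : List String → List (String × Int)
  | [] => []
  | a :: t => pvConsRun a (pvRuns t)

theorem pvRuns_head (t : List String) : ∀ (x : String),
    ∃ k r, pvRuns (x :: t) = (x, k) :: r ∧ 1 ≤ k := by
  induction t with
  | nil => intro x; exact ⟨1, [], rfl, le_refl _⟩
  | cons c t ih =>
    intro x
    obtain ⟨m, r, hcr, hm⟩ := ih c
    by_cases h : x = c
    · subst h
      refine ⟨m + 1, r, ?_, by omega⟩
      simp only [pvRuns] at hcr ⊢
      rw [hcr]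
      simp [pvConsRun]
    · refine ⟨1, (c, m) :: r, ?_, le_refl _⟩
      simp only [pvRuns] at hcr ⊢
      rw [hcr]
      simp [pvConsRun, h]

theorem pvRuns_append (l : List String) (a : String) :
    pvRuns (l ++ [a]) = pvSnoc2 (pvRuns l) a := by
  induction l with
  | nil => simp [pvRuns, pvConsRun, pvSnoc2]
  | cons x t ih =>
    simp only [List.cons_append, pvRuns, ih]
    rcases ht : pvRuns t with _ | ⟨⟨v, k⟩, _ | ⟨⟨w, m⟩, r⟩⟩
    · by_cases h : x = a
      · subst h; simp [pvSnoc2, pvConsRun]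
      · have hax : ¬ a = x := fun hh => h hh.symm
        simp [pvSnoc2, pvConsRun, h, hax]
    · by_cases hva : v = a
      · subst hva
        by_cases hxv : x = v
        · subst hxv; simp [pvSnoc2, pvConsRun]
        · simp [pvSnoc2, pvConsRun, hxv]
      · have hav : ¬ a = v := fun hh => hva hh.symm
        by_cases hxv : x = v
        · subst hxv; simp [pvSnoc2, pvConsRun, hva]
        · simp [pvSnoc2, pvConsRun, hva, hxv]
    · by_cases hxv : x = v <;> simp [pvSnoc2, pvConsRun, hxv]

/-- The B fold over approach_seq builds pvRuns of the filtered list. -/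
theorem pvFold_runs (xs : List (Option String)) :
    xs.foldl
      (fun acc o =>
        match o with
        | none => acc
        | some s => if s = "" ∨ s = "unknown" then acc else pvSnocRun acc s) []
      = pvRuns (pvCleanA xs) := by
  have key : ∀ (l : List String),
      l.foldl pvSnocRun [] = pvRuns l := by
    intro l
    induction l using List.reverseRecOn with
    | nil => simp [pvRuns]
    | append_singleton t a ih =>
      rw [List.foldl_append, List.foldl_cons, List.foldl_nil, ih, pvRuns_append,
        pvSnocRun_eq]
  have filt : ∀ (xs : List (Option String)) (acc : List (String × Int)),
      xs.foldl
        (fun acc o =>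
          match o with
          | none => acc
          | some s => if s = "" ∨ s = "unknown" then acc else pvSnocRun acc s) acc
        = (pvCleanA xs).foldl pvSnocRun acc := by
    intro xs
    induction xs with
    | nil => intro acc; simp [pvCleanA]
    | cons x t ih =>
      intro acc
      rcases x with _ | s
      · simpa [pvCleanA] using ih acc
      · by_cases h : s = "" ∨ s = "unknown"
        · have h' : ¬ (s ≠ "" ∧ s ≠ "unknown") := by tauto
          simp only [pvCleanA, List.filterMap_cons] at *
          simp [h, h', ih]
        · have h' : s ≠ "" ∧ s ≠ "unknown" := by tauto
          simp only [pvCleanA, List.filterMap_cons] at *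
          simp [h, h', ih]
  rw [filt, key]

/-- Count of interior singleton runs flanked by equal values. -/
def pvCntRuns : List (String × Int) → Int
  | p :: q :: r :: t => (if q.2 = 1 ∧ p.1 = r.1 then 1 else 0) + pvCntRuns (q :: r :: t)
  | _ => 0

theorem pvZip_cntRuns (rs : List (String × Int)) (acc : Int) :
    (rs.zip ((rs.drop 1).zip (rs.drop 2))).foldl
      (fun osc pqr => if pqr.2.1.2 = 1 ∧ pqr.1.1 = pqr.2.2.1 then osc + 1 else osc) acc
      = acc + pvCntRuns rs := by
  induction rs using pvCntRuns.induct generalizing acc with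
  | case2 rs h =>
    rcases rs with _ | ⟨p, _ | ⟨q, _ | ⟨r, t⟩⟩⟩
    · simp [pvCntRuns]
    · simp [pvCntRuns]
    · simp [pvCntRuns]
    · exact (h p q r t rfl).elim
  | case1 p q r t ih =>
    simp only [List.drop_succ_cons, List.drop_zero, List.zip_cons_cons, List.foldl_cons]
    have := ih (acc := if q.2 = 1 ∧ p.1 = r.1 then acc + 1 else acc)
    simp only [List.drop_succ_cons, List.drop_zero] at this
    rw [this]
    conv_rhs => rw [pvCntRuns]
    split <;> ring

/-- pvCntRuns ignores the length of the FIRST run. -/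
theorem pvCntRuns_fst (k₁ k₂ : Int) (v : String) (r : List (String × Int)) :
    pvCntRuns ((v, k₁) :: r) = pvCntRuns ((v, k₂) :: r) := by
  rcases r with _ | ⟨q, _ | ⟨w, r⟩⟩ <;> simp [pvCntRuns]

theorem pvCntRuns_cnt3 (l : List String) :
    pvCntRuns (pvRuns l) = pvCnt3 l := by
  induction l using pvCnt3.induct with
  | case2 l h =>
    rcases l with _ | ⟨a, _ | ⟨b, t⟩⟩
    · simp [pvRuns, pvCntRuns, pvCnt3]
    · simp [pvRuns, pvConsRun, pvCntRuns, pvCnt3]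
    · rcases t with _ | ⟨c, t⟩
      · simp only [pvRuns, pvConsRun, pvCnt3]
        by_cases h' : a = b <;> simp [h', pvCntRuns]
      · exact (h a b c t rfl).elim
  | case1 a b c t ih =>
    obtain ⟨k, r, hbr, hk⟩ := pvRuns_head (c :: t) b
    by_cases hab : a = b
    · subst hab
      have hruns : pvRuns (a :: a :: c :: t) = (a, k + 1) :: r := by
        simp only [pvRuns] at hbr ⊢
        rw [hbr]
        simp [pvConsRun]
      rw [hruns, pvCntRuns_fst (k + 1) k a r, ← hbr, ih]
      conv_rhs => rw [pvCnt3]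
      simp
    · have hruns : pvRuns (a :: b :: c :: t) = (a, 1) :: (b, k) :: r := by
        simp only [pvRuns] at hbr ⊢
        rw [hbr]
        simp [pvConsRun, hab]
      rw [hruns]
      conv_rhs => rw [pvCnt3]
      rw [← ih, hbr]
      obtain ⟨m, r', hcr, hm⟩ := pvRuns_head t c
      by_cases hbc : b = c
    -- c merges into b's run, so k = m + 1 ≥ 2: no singleton, and the triple fails (b = c)
      · have hbr' : pvRuns (b :: c :: t) = (c, m + 1) :: r' := by
          simp only [pvRuns] at hcr ⊢
          rw [hcr]
          simp [pvConsRun, hbc]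
        rw [hbr'] at hbr
        injection hbr with hbk hr
        have hk1 : k = m + 1 := by
          have := congrArg Prod.snd hbk; simpa using this.symm
        have hkne : ¬ k = 1 := by omega
        subst hr
        rcases r' with _ | ⟨⟨w, mw⟩, r''⟩
        · simp [pvCntRuns, hbc]
        · simp [pvCntRuns, hbc, hkne]
    -- b's run is a singleton and the next run carries c
      · have hbr' : pvRuns (b :: c :: t) = (b, 1) :: (c, m) :: r' := by
          simp only [pvRuns] at hcr ⊢
          rw [hcr]
          simp [pvConsRun, hbc]
        rw [hbr'] at hbr
        injection hbr with hbk hr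
        have hk1 : k = 1 := by
          have := congrArg Prod.snd hbk; simpa using this.symm
        have hcb : ¬ c = b := fun hh => hbc hh.symm
        subst hk1
        subst hr
        rcases r' with _ | ⟨⟨w, mw⟩, r''⟩ <;>
          · by_cases hac : a = c <;> simp [pvCntRuns, hab, hbc, hcb, hac]

theorem pvCount_slice (rs : List (String × Int)) :
    (rs.zip ((PySem.List.slice rs (some 1) none).zip (PySem.List.slice rs (some 2) none))).foldl
      (fun osc pqr => if pqr.2.1.2 = 1 ∧ pqr.1.1 = pqr.2.2.1 then osc + 1 else osc) 0
      = pvCntRuns rs := by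
  rw [PySem.List.slice_from rs (by omega : (0:Int) ≤ 1),
    PySem.List.slice_from rs (by omega : (0:Int) ≤ 2)]
  simpa using pvZip_cntRuns rs 0

theorem pvB_eq_cnt3 (xs : List (Option String)) :
    count_approach_oscillations_alt xs = pvCnt3 (pvCleanA xs) := by
  unfold count_approach_oscillations_alt
  rw [pvFold_runs]
  exact (pvCount_slice (pvRuns (pvCleanA xs))).trans (pvCntRuns_cnt3 _)

-- ===== VERDICT (by name: the statement is the Claim_ definition above) =====
theorem count_approach_oscillations_spec : Claim_equal_count_approach_oscillations := by
  intro xs _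
  unfold Spec_count_approach_oscillations
  rw [pvA_eq_cnt3, pvB_eq_cnt3]
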